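-- pv_equiv track=rewrite | github.com/Ar-Kareem/SAT_puzzle_solver | src/puzzle_solver/puzzles/tapa/tapa.py | rotated_assignments_N_nums
-- ===== SOURCE A (Python) =====
-- from itertools import combinations
--
-- def rotated_assignments_N_nums(Xs: tuple[int, ...], target_length: int = 8) -> set[tuple[bool, ...]]:
--     """ Given Xs = [X1, X2, ..., Xm] (each Xi >= 1), build all unique length-`target_length`
--         boolean lists of the form: [ True*X1, False*N1, True*X2, False*N2, ..., True*Xm, False*Nm ]
--         where each Ni >= 1 and sum(Xs) + sum(Ni) = target_length,
--         including all `target_length` wrap-around rotations, de-duplicated.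
--     """
--     assert len(Xs) >= 1, "Xs must have at least one block length."
--     assert all(x >= 1 for x in Xs), "All Xi must be >= 1."
--     assert sum(Xs) + len(Xs) <= target_length, f"sum(Xs) + len(Xs) <= target_length required; got {sum(Xs)} + {len(Xs)} > {target_length}"
--     num_zero_blocks = len(Xs)
--     total_zeros = target_length - sum(Xs)
--     seen: set[tuple[bool, ...]] = set()
--     for cut_positions in combinations(range(1, total_zeros), num_zero_blocks - 1):
--         cut_positions = (*cut_positions, total_zeros)
--         Ns = [cut_positions[0]]  # length of zero blocks
--         for i in range(1, len(cut_positions)):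
--             Ns.append(cut_positions[i] - cut_positions[i - 1])
--         base: list[bool] = []
--         for x, n in zip(Xs, Ns):
--             base.extend([True] * x)
--             base.extend([False] * n)
--         for dx in range(target_length):  # all rotations (wrap-around)
--             rot = tuple(base[dx:] + base[:dx])
--             seen.add(rot)
--     return seen
-- ===== SOURCE B (Python) =====
-- def rotated_assignments_N_nums(Xs, target_length=8):
--     assert len(Xs) >= 1, "Xs must have at least one block length."
--     assert all(x >= 1 for x in Xs), "All Xi must be >= 1."
--     assert sum(Xs) + len(Xs) <= target_length, f"sum(Xs) + len(Xs) <= target_length required; got {sum(Xs)} + {len(Xs)} > {target_length}"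
--     total_zeros = target_length - sum(Xs)
--
--     def comps(remaining, blocks_left):
--         # every list of positive ints of length blocks_left summing to `remaining`, lexicographic
--         if blocks_left == 1:
--             yield [remaining]
--             return
--         for n in range(1, remaining - (blocks_left - 1) + 1):
--             for rest in comps(remaining - n, blocks_left - 1):
--                 yield [n] + rest
--
--     seen = set()
--     for Ns in comps(total_zeros, len(Xs)):
--         base = [b for x, n in zip(Xs, Ns) for b in [True] * x + [False] * n]
--         doubled = base + base
--         for dx in range(target_length):
--             seen.add(tuple(doubled[dx:dx + target_length]))
--     return seen
-- ===== Notes on version B (the rewrite author's own statement) =====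
-- stated objective: alternative
-- what changed: B enumerates the zero-block lengths directly with a recursive integer-composition generator (instead of A's itertools.combinations over cut positions followed by a differencing pass), builds each base pattern with a single interleaving comprehension, and reads every rotation out of a doubled base list instead of concatenating two slices.
import Mathlib
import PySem

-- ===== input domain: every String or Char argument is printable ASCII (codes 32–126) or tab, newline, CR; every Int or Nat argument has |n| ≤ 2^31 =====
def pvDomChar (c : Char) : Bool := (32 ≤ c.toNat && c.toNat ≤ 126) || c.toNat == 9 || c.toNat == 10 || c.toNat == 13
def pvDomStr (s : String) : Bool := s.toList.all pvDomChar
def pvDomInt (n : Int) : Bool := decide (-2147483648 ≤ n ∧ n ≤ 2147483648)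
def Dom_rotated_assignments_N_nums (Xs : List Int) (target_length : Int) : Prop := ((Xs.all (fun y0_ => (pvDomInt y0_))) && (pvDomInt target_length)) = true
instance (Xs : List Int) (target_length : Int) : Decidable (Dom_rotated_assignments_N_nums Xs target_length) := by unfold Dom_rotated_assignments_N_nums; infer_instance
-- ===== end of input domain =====

-- B replaces A's combinations-of-cut-positions enumeration by a recursive composition
-- generator and reads each rotation out of a doubled base list (objective: alternative,
-- same asymptotic cost). Equivalence is proved on the inputs A's asserts admit (Pre_).

-- ===== PORT A =====
-- hand port of itertools.combinations(l, k) (PySem has no combinations primitive):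
-- exact — itertools yields the k-subsequences of l in lexicographic order of positions,
-- which is precisely this recursion (those containing the head first, then the rest).
def pvComb {α : Type} : List α → Nat → List (List α)
  | _, 0 => [[]]
  | [], _ + 1 => []
  | x :: xs, k + 1 => (pvComb xs k).map (x :: ·) ++ pvComb xs (k + 1)

def rotated_assignments_N_nums (Xs : List Int) (target_length : Int) : List (List Bool) :=
  let num_zero_blocks := Xs.length
  let total_zeros := target_length - Xs.sum
  (pvComb (PySem.List.pyRange 1 total_zeros 1) (num_zero_blocks - 1)).foldl
    (fun seen cuts =>
      let cut_positions := cuts ++ [total_zeros]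
      let Ns := (PySem.List.pyRange 1 (cut_positions.length : Int) 1).foldl
        (fun ns i =>
          ns ++ [PySem.List.pyGetD cut_positions i 0 - PySem.List.pyGetD cut_positions (i - 1) 0])
        [PySem.List.pyGetD cut_positions 0 0]
      let base := (Xs.zip Ns).foldl
        (fun b xn => b ++ List.replicate xn.1.toNat true ++ List.replicate xn.2.toNat false) []
      (PySem.List.pyRange 0 target_length 1).foldl
        (fun seen dx =>
          PySem.Set.add seen
            (PySem.List.slice base (some dx) none ++ PySem.List.slice base none (some dx)))
        seen)
    PySem.Set.empty

-- ===== PORT B =====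
-- compositions of `remaining` into `blocks_left` positive parts, lexicographic
def pvComps : Int → Nat → List (List Int)
  | _, 0 => []          -- blocks_left = 0 is never reached from the top-level call
  | r, 1 => [[r]]
  | r, b + 2 =>
      (PySem.List.pyRange 1 (r - ((b : Int) + 1) + 1) 1).flatMap
        (fun n => (pvComps (r - n) (b + 1)).map (n :: ·))

def pvRotations (Xs : List Int) (target_length : Int) (Ns : List Int) : List (List Bool) :=
  let base := (Xs.zip Ns).flatMap
    (fun xn => List.replicate xn.1.toNat true ++ List.replicate xn.2.toNat false)
  let doubled := base ++ base
  (PySem.List.pyRange 0 target_length 1).map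
    (fun dx => PySem.List.slice doubled (some dx) (some (dx + target_length)))

def rotated_assignments_N_nums_alt (Xs : List Int) (target_length : Int) : List (List Bool) :=
  let total_zeros := target_length - Xs.sum
  PySem.Set.ofList
    ((pvComps total_zeros Xs.length).flatMap (pvRotations Xs target_length))

-- ===== PRECONDITION & SPEC =====
-- Pre_ = exactly the inputs A's three asserts admit (A raises AssertionError otherwise).
def Pre_rotated_assignments_N_nums (Xs : List Int) (target_length : Int) : Prop :=
  Xs ≠ [] ∧ (∀ x ∈ Xs, 1 ≤ x) ∧ Xs.sum + Xs.length ≤ target_length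
instance (Xs : List Int) (target_length : Int) : Decidable (Pre_rotated_assignments_N_nums Xs target_length) := by
  unfold Pre_rotated_assignments_N_nums; infer_instance

def pvWitness_rotated_assignments_N_nums : List Int × Int := ([1, 2], 6)

def Spec_rotated_assignments_N_nums (Xs : List Int) (target_length : Int) (out : List (List Bool)) : Prop := out = rotated_assignments_N_nums_alt Xs target_length
instance (Xs : List Int) (target_length : Int) (out : List (List Bool)) : Decidable (Spec_rotated_assignments_N_nums Xs target_length out) := by unfold Spec_rotated_assignments_N_nums; infer_instance

-- ===== CLAIM (what is proved, stated in full; the proofs are below) =====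
def Claim_equal_rotated_assignments_N_nums : Prop := ∀ (Xs : List Int) (target_length : Int), Dom_rotated_assignments_N_nums Xs target_length → Pre_rotated_assignments_N_nums Xs target_length → Spec_rotated_assignments_N_nums Xs target_length (rotated_assignments_N_nums Xs target_length)

-- ===== LEMMAS AND PROOFS =====

-- successive differences: pvDiffs p [c1,…,ck] = [c1-p, c2-c1, …, ck-c(k-1)]
def pvDiffs : Int → List Int → List Int
  | _, [] => []
  | p, c :: cs => (c - p) :: pvDiffs c cs

theorem pvDiffs_idx (cp : List Int) (p : Int) (h : cp ≠ []) :
    pvDiffs p cp =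
      (cp.getD 0 0 - p) ::
        (List.range (cp.length - 1)).map (fun k => cp.getD (k + 1) 0 - cp.getD k 0) := by
  induction cp generalizing p with
  | nil => exact absurd rfl h
  | cons c cs ih =>
    cases cs with
    | nil => simp [pvDiffs]
    | cons c2 cs2 =>
      have := ih (p := c) (by simp)
      simp only [pvDiffs] at this ⊢
      rw [this]
      simp [List.range_succ_eq_map, Function.comp_def]

theorem pvNsA_eq (cp : List Int) (h : cp ≠ []) :
    (PySem.List.pyRange 1 (cp.length : Int) 1).foldl
      (fun ns i =>
        ns ++ [PySem.List.pyGetD cp i 0 - PySem.List.pyGetD cp (i - 1) 0])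
      [PySem.List.pyGetD cp 0 0] = pvDiffs 0 cp := by
  rw [PySem.List.foldl_append_singleton_eq_map]
  rw [pvDiffs_idx cp 0 h]
  rw [PySem.List.pyRange_one]
  have hlen : ((cp.length : Int) - 1).toNat = cp.length - 1 := by omega
  rw [hlen, List.map_map]
  simp only [PySem.List.pyGetD_zero, List.singleton_append, sub_zero]
  congr 1
  apply List.map_congr_left
  intro k hk
  simp only [Function.comp_apply]
  have h1 : (1 : Int) + (k : Int) = ((k + 1 : Nat) : Int) := by push_cast; ring
  rw [h1]
  rw [PySem.List.pyGetD_natCast]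
  rw [show ((k + 1 : Nat) : Int) - 1 = ((k : Nat) : Int) by push_cast; ring]
  rw [PySem.List.pyGetD_natCast]

theorem pvComb_map {α β : Type} (f : α → β) (l : List α) (k : Nat) :
    pvComb (l.map f) k = (pvComb l k).map (List.map f) := by
  induction l generalizing k with
  | nil => cases k <;> simp [pvComb]
  | cons x xs ih =>
    cases k with
    | zero => simp [pvComb]
    | succ k => simp [pvComb, ih, Function.comp_def]

theorem pvRange_shift (a b c : Int) :
    PySem.List.pyRange (a + c) (b + c) 1 = (PySem.List.pyRange a b 1).map (· + c) := by
  rw [PySem.List.pyRange_one, PySem.List.pyRange_one]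
  have : (b + c - (a + c)) = b - a := by ring
  rw [this]
  simp [Function.comp_def]
  intro k _
  ring

theorem pvComb_group (k : Nat) (a t : Int) :
    pvComb (PySem.List.pyRange a t 1) (k + 1) =
      (PySem.List.pyRange a t 1).flatMap
        (fun c => (pvComb (PySem.List.pyRange (c + 1) t 1) k).map (c :: ·)) := by
  by_cases hat : t ≤ a
  · rw [PySem.List.pyRange_one_eq_nil hat]; rfl
  · rw [not_le] at hat
    have hlt : ((t - (a+1)).toNat) < ((t - a).toNat) := by omega
    rw [PySem.List.pyRange_one_cons hat, pvComb, List.flatMap_cons,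
      pvComb_group k (a+1) t]
termination_by (t - a).toNat
decreasing_by omega

theorem pvDiffs_shift (l : List Int) : ∀ (p c : Int),
    pvDiffs (p + c) (l.map (· + c)) = pvDiffs p l := by
  induction l with
  | nil => intro p c; rfl
  | cons x xs ih => intro p c; simp only [List.map_cons, pvDiffs, ih]; ring_nf

theorem pvComps_nil (b : Nat) (t : Int) (h : t < (b : Int) + 2) :
    pvComps t (b + 2) = [] := by
  rw [pvComps]
  rw [PySem.List.pyRange_one_eq_nil (by omega)]
  rfl

theorem pvMain (m : Nat) : ∀ (t : Int),
    (pvComb (PySem.List.pyRange 1 t 1) m).map (fun cuts => pvDiffs 0 (cuts ++ [t])) =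
      pvComps t (m + 1) := by
  induction m with
  | zero =>
    intro t
    simp [pvComb, pvComps, pvDiffs]
  | succ m ih =>
    intro t
    rw [pvComb_group m 1 t, List.map_flatMap]
    have hbody : ∀ c : Int, 1 ≤ c → c < t →
        ((pvComb (PySem.List.pyRange (c + 1) t 1) m).map (c :: ·)).map
            (fun cuts => pvDiffs 0 (cuts ++ [t]))
          = (pvComps (t - c) (m + 1)).map (c :: ·) := by
      intro c _ _
      have hsh : PySem.List.pyRange (c + 1) t 1 = (PySem.List.pyRange 1 (t - c) 1).map (· + c) := by
        have := pvRange_shift 1 (t - c) c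
        rw [show (1 : Int) + c = c + 1 by ring, show t - c + c = t by ring] at this
        exact this
      rw [hsh, pvComb_map, List.map_map, List.map_map]
      rw [← ih (t - c), List.map_map]
      apply List.map_congr_left
      intro cuts _
      simp only [Function.comp_apply, List.cons_append, pvDiffs, sub_zero]
      congr 1
      have hmt : (cuts.map (· + c)) ++ [t] = (cuts ++ [t - c]).map (· + c) := by
        simp [show t - c + c = t by ring]
      rw [hmt]
      have h2 := pvDiffs_shift (cuts ++ [t - c]) 0 c
      rw [show (0 : Int) + c = c by ring] at h2
      exact h2
    have hG : ((PySem.List.pyRange 1 t 1).flatMap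
          (fun c => ((pvComb (PySem.List.pyRange (c + 1) t 1) m).map (c :: ·)).map
            (fun cuts => pvDiffs 0 (cuts ++ [t]))))
        = (PySem.List.pyRange 1 t 1).flatMap
            (fun c => (pvComps (t - c) (m + 1)).map (c :: ·)) := by
      apply List.flatMap_congr
      intro c hc
      rw [PySem.List.mem_pyRange_one] at hc
      exact hbody c hc.1 hc.2
    rw [hG]
    cases m with
    | zero =>
      rw [pvComps]
      norm_num
    | succ m0 =>
      rw [pvComps]
      have harg : t - ((m0 + 1 : Nat) : Int) - 1 + 1 + 1 = t - m0 - 1 + 1 := by push_cast; ring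
      by_cases h1 : 1 ≤ t - (m0 : Int) - 1
      · rw [PySem.List.pyRange_one_append 1 (t - (m0 : Int) - 1) t h1 (by omega),
          List.flatMap_append]
        have hnil : ((PySem.List.pyRange (t - (m0 : Int) - 1) t 1).flatMap
            (fun c => (pvComps (t - c) (m0 + 1 + 1)).map (c :: ·))) = [] := by
          rw [List.flatMap_congr (g := fun _ => ([] : List (List Int))) ?_]
          · simp
          · intro c hc
            rw [PySem.List.mem_pyRange_one] at hc
            rw [pvComps_nil m0 (t - c) (by omega)]
            rfl
        rw [hnil, List.append_nil]
        congr 2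
        push_cast
        ring
      · rw [PySem.List.pyRange_one_eq_nil (show (t - (((m0+1:Nat) : Int) + 1) + 1) ≤ 1 by push_cast; omega), List.flatMap_nil]
        rw [List.flatMap_congr (g := fun _ => ([] : List (List Int))) ?_]
        · simp
        · intro c hc
          rw [PySem.List.mem_pyRange_one] at hc
          rw [pvComps_nil m0 (t - c) (by omega)]
          rfl

theorem pvComps_mem : ∀ (m : Nat) (t : Int) (Ns : List Int), 1 ≤ m → (m : Int) ≤ t →
    Ns ∈ pvComps t m → Ns.sum = t ∧ (Ns.length = m ∧ ∀ x ∈ Ns, 1 ≤ x) := by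
  intro m
  induction m with
  | zero => intro t Ns h; omega
  | succ b ih =>
    intro t Ns _ hle hmem
    cases b with
    | zero =>
      simp [pvComps] at hmem
      subst hmem
      refine ⟨by simp, by simp, ?_⟩
      intro x hx
      simp at hx
      simp at hle
      omega
    | succ b0 =>
      rw [pvComps] at hmem
      simp only [List.mem_flatMap, List.mem_map] at hmem
      obtain ⟨n, hn, rest, hrest, hcons⟩ := hmem
      rw [PySem.List.mem_pyRange_one] at hn
      have hble : ((b0:Int) + 1 + 1) ≤ t := by exact_mod_cast hle
      have := ih (t - n) rest (by omega) (by push_cast; omega) hrest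
      subst hcons
      refine ⟨by simp only [List.sum_cons, this.1]; ring, by simp [this.2.1], ?_⟩
      intro x hx
      rcases List.mem_cons.mp hx with h | h
      · omega
      · exact this.2.2 x h

theorem pvBase_len : ∀ (xs ns : List Int),
    (∀ x ∈ xs, 1 ≤ x) → (∀ n ∈ ns, 1 ≤ n) → xs.length = ns.length →
    (((xs.zip ns).flatMap
        (fun xn => List.replicate xn.1.toNat true ++ List.replicate xn.2.toNat false)).length : Int)
      = xs.sum + ns.sum := by
  intro xs
  induction xs with
  | nil => intro ns _ _ hlen; cases ns with
    | nil => simp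
    | cons n ns => simp at hlen
  | cons x xs ih =>
    intro ns hx hn hlen
    cases ns with
    | nil => simp at hlen
    | cons n ns =>
      have hx1 : 1 ≤ x := hx x (by simp)
      have hn1 : 1 ≤ n := hn n (by simp)
      simp only [List.zip_cons_cons, List.flatMap_cons, List.length_append,
        List.length_replicate, List.sum_cons]
      push_cast
      rw [ih ns (fun y hy => hx y (by simp [hy])) (fun y hy => hn y (by simp [hy])) (by simpa using hlen)]
      rw [Int.toNat_of_nonneg (by omega), Int.toNat_of_nonneg (by omega)]
      ring

theorem pvRotate_eq {α : Type} (b : List α) (j : Nat) (h : j ≤ b.length) :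
    ((b ++ b).drop j).take b.length = b.drop j ++ b.take j := by
  rw [List.drop_append_of_le_length h, List.take_append]
  congr 1
  · exact List.take_of_length_le (by simp)
  · congr 1
    simp
    omega

theorem pvFoldl_add_flat {α β : Type} [BEq β] (l : List α) (g : α → List β) (s : PySem.Set β) :
    l.foldl (fun s c => (g c).foldl PySem.Set.add s) s =
      (l.flatMap g).foldl PySem.Set.add s := by
  induction l generalizing s with
  | nil => rfl
  | cons x xs ih => simp [List.foldl_append, ih]

theorem pvFinal (Xs : List Int) (t : Int)
    (hpre : Pre_rotated_assignments_N_nums Xs t) :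
    rotated_assignments_N_nums Xs t = rotated_assignments_N_nums_alt Xs t := by
  obtain ⟨hne, hpos, hsum⟩ := hpre
  have hm1 : 1 ≤ Xs.length := List.length_pos_iff.mpr hne
  have hsumgen : ∀ xs : List Int, (∀ x ∈ xs, 1 ≤ x) → (xs.length : Int) ≤ xs.sum := by
    intro xs
    induction xs with
    | nil => simp
    | cons x xs ih =>
      intro hp
      simp only [List.sum_cons, List.length_cons]
      have h1 := hp x (by simp)
      have h2 := ih (fun y hy => hp y (by simp [hy]))
      push_cast
      omega
  have hsumpos : (Xs.length : Int) ≤ Xs.sum := hsumgen Xs hpos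
  set tz := t - Xs.sum with htz
  have hmtz : (Xs.length : Int) ≤ tz := by omega
  -- A as a flat ofList
  rw [rotated_assignments_N_nums, rotated_assignments_N_nums_alt]
  simp only
  -- turn the inner rotation loop into Set.update of a mapped list
  have hinner : ∀ (base : List Bool) (seen : PySem.Set (List Bool)),
      (PySem.List.pyRange 0 t 1).foldl
        (fun seen dx =>
          PySem.Set.add seen
            (PySem.List.slice base (some dx) none ++ PySem.List.slice base none (some dx)))
        seen
      = ((PySem.List.pyRange 0 t 1).map
          (fun dx => PySem.List.slice base (some dx) none ++ PySem.List.slice base none (some dx))).foldl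
          PySem.Set.add seen := by
    intro base seen
    rw [← PySem.Set.update_map_eq_foldl_add]
    rfl
  simp only [hinner]
  rw [pvFoldl_add_flat]
  have hofl : ∀ xs : List (List Bool), xs.foldl PySem.Set.add PySem.Set.empty = PySem.Set.ofList xs := by
    intro xs; rw [PySem.Set.ofList_eq_foldl]; rfl
  rw [hofl]
  congr 1
  -- streams equal
  have hcomps : (pvComb (PySem.List.pyRange 1 tz 1) (Xs.length - 1)).map
      (fun cuts => pvDiffs 0 (cuts ++ [tz])) = pvComps tz Xs.length := by
    have := pvMain (Xs.length - 1) tz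
    rwa [Nat.sub_add_cancel hm1] at this
  rw [← hcomps, List.flatMap_map]
  apply List.flatMap_congr
  intro cuts hcuts
  have hNs : (PySem.List.pyRange 1 ((cuts ++ [tz]).length : Int) 1).foldl
      (fun ns i =>
        ns ++ [PySem.List.pyGetD (cuts ++ [tz]) i 0 - PySem.List.pyGetD (cuts ++ [tz]) (i - 1) 0])
      [PySem.List.pyGetD (cuts ++ [tz]) 0 0] = pvDiffs 0 (cuts ++ [tz]) :=
    pvNsA_eq (cuts ++ [tz]) (by simp)
  rw [hNs]
  set Ns := pvDiffs 0 (cuts ++ [tz]) with hNsdef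
  have hNmem : Ns ∈ pvComps tz Xs.length := by
    rw [← hcomps]
    exact List.mem_map.mpr ⟨cuts, hcuts, rfl⟩
  obtain ⟨hNsum, hNlen, hNpos⟩ := pvComps_mem Xs.length tz Ns hm1 hmtz hNmem
  -- base lists agree
  have hbase : (Xs.zip Ns).foldl
      (fun b xn => b ++ List.replicate xn.1.toNat true ++ List.replicate xn.2.toNat false) []
      = (Xs.zip Ns).flatMap
          (fun xn => List.replicate xn.1.toNat true ++ List.replicate xn.2.toNat false) := by
    simp only [List.append_assoc]
    rw [PySem.List.foldl_append_eq_flatMap]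
    rfl
  rw [pvRotations]
  simp only [← hbase]
  set base := (Xs.zip Ns).foldl
      (fun b xn => b ++ List.replicate xn.1.toNat true ++ List.replicate xn.2.toNat false) []
    with hbasedef
  have hblen : (base.length : Int) = t := by
    rw [hbase, pvBase_len Xs Ns hpos hNpos hNlen.symm]
    omega
  apply List.map_congr_left
  intro dx hdx
  rw [PySem.List.mem_pyRange_one] at hdx
  obtain ⟨hdx0, hdxt⟩ := hdx
  rw [PySem.List.slice_from base hdx0, PySem.List.slice_to base hdx0,
    PySem.List.slice_toNat (base ++ base) hdx0 (by omega)]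
  have h1 : (dx + t).toNat - dx.toNat = base.length := by omega
  rw [h1, pvRotate_eq base dx.toNat (by omega)]


-- ===== VERDICT (by name: the statement is the Claim_ definition above) =====
theorem rotated_assignments_N_nums_spec : Claim_equal_rotated_assignments_N_nums := by
  intro Xs target_length _ hpre
  unfold Spec_rotated_assignments_N_nums
  exact pvFinal Xs target_length hpre
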